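-- pv_equiv track=rewrite | github.com/jensabrahamsson/overblick | blick/plugins/moltbook/challenge_solver.py | _find_letter_combination
-- ===== SOURCE A (Python) =====
-- from typing import Optional
--
-- def _find_letter_combination(
--     target_sum: int, word_count: int
-- ) -> Optional[list[str]]:
--     """
--     Find a combination of lowercase letters whose ASCII codes sum to target.
--
--     Strategy:
--     - ASCII 'a' = 97, 'z' = 122
--     - Minimum possible sum: word_count * 97
--     - Maximum possible sum: word_count * 122
--     - Start with all 'a's (baseline = word_count * 97)
--     - Distribute remaining (target - baseline) across letters
--
--     Args:
--         target_sum: Target ASCII sum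
--         word_count: Number of letters needed
--
--     Returns:
--         List of single-character strings, or None if impossible
--     """
--     min_sum = word_count * 97   # all 'a'
--     max_sum = word_count * 122  # all 'z'
--
--     if target_sum < min_sum or target_sum > max_sum:
--         return None
--
--     # Start with all 'a's
--     letters = [97] * word_count  # ASCII codes
--     remaining = target_sum - min_sum
--
--     # Distribute remaining value across letters (greedy from end)
--     for i in range(word_count - 1, -1, -1):
--         if remaining <= 0:
--             break
--         add = min(remaining, 25)  # Max bump is 25 (a→z)
--         letters[i] += add
--         remaining -= add
--
--     if remaining != 0:
--         return None  # Should not happen given bounds check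
--
--     return [chr(c) for c in letters]
-- ===== SOURCE B (Python) =====
-- def _find_letter_combination(target_sum, word_count):
--     lo = word_count * 97
--     if not (lo <= target_sum <= word_count * 122):
--         return None
--     q, r = divmod(target_sum - lo, 25)
--     plain = word_count - q - (1 if r else 0)
--     return ['a'] * plain + ([chr(97 + r)] if r else []) + ['z'] * q
-- ===== Notes on version B (the rewrite author's own statement) =====
-- stated objective: simpler
-- what changed: Replaces A's greedy per-position distribution loop (bump each letter from the end by up to 25) with a single divmod of the surplus by 25 that directly builds the 'a'-prefix, one partial letter, and 'z'-suffix.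
import Mathlib
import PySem

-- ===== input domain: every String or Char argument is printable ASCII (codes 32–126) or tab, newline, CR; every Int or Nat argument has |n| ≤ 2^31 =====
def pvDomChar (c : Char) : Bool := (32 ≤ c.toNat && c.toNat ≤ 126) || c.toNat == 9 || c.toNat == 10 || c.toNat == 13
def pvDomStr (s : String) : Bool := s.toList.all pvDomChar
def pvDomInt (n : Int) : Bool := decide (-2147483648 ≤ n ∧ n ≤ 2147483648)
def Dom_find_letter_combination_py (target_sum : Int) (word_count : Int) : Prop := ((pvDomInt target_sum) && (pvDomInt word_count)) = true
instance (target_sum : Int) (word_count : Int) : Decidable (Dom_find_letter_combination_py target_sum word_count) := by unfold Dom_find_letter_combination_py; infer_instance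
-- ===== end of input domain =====

-- B replaces A's greedy distribution loop by a single divmod and direct construction of the
-- 'a'-prefix / partial letter / 'z'-suffix (objective: simpler, same O(word_count) cost).

-- ===== PORT A =====
-- the greedy loop 'for i in range(word_count-1,-1,-1): …' with its break, over state (letters, remaining)
def pvLoopA : List Int → List Int → Int → List Int × Int
  | [], letters, remaining => (letters, remaining)
  | i :: rest, letters, remaining =>
    if remaining ≤ 0 then (letters, remaining)
    else
      pvLoopA rest (letters.modify i.toNat (· + min remaining 25)) (remaining - min remaining 25)

def find_letter_combination_py (target_sum : Int) (word_count : Int) : Option (List String) :=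
  if target_sum < word_count * 97 ∨ target_sum > word_count * 122 then none
  else
    match pvLoopA (PySem.List.pyRange (word_count - 1) (-1) (-1))
            (List.replicate word_count.toNat (97 : Int)) (target_sum - word_count * 97) with
    | (letters, remaining) =>
      if remaining ≠ 0 then none
      else some (letters.map (fun c => String.ofList [Char.ofNat c.toNat]))

-- ===== PORT B =====
def find_letter_combination_py_alt (target_sum : Int) (word_count : Int) : Option (List String) :=
  if word_count * 97 ≤ target_sum ∧ target_sum ≤ word_count * 122 then
    some (List.replicate (word_count - PySem.Int.floordiv (target_sum - word_count * 97) 25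
            - (if PySem.Int.mod (target_sum - word_count * 97) 25 ≠ 0 then 1 else 0)).toNat "a"
          ++ (if PySem.Int.mod (target_sum - word_count * 97) 25 ≠ 0 then
                [String.ofList [Char.ofNat (97 + PySem.Int.mod (target_sum - word_count * 97) 25).toNat]]
              else [])
          ++ List.replicate (PySem.Int.floordiv (target_sum - word_count * 97) 25).toNat "z")
  else none

-- ===== PRECONDITION & SPEC =====
def Spec_find_letter_combination_py (target_sum : Int) (word_count : Int) (out : Option (List String)) : Prop := out = find_letter_combination_py_alt target_sum word_count
instance (target_sum : Int) (word_count : Int) (out : Option (List String)) : Decidable (Spec_find_letter_combination_py target_sum word_count out) := by unfold Spec_find_letter_combination_py; infer_instance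

-- ===== CLAIM (what is proved, stated in full; the proofs are below) =====
def Claim_equal_find_letter_combination_py : Prop := ∀ (target_sum : Int) (word_count : Int), Dom_find_letter_combination_py target_sum word_count → Spec_find_letter_combination_py target_sum word_count (find_letter_combination_py target_sum word_count)

-- ===== LEMMAS AND PROOFS =====

-- modifying position m of (replicate (m+1) a ++ tail) hits the last replicated element
lemma modify_replicate_append (a : Int) (f : Int → Int) (tail : List Int) :
    ∀ m : Nat, (List.replicate (m + 1) a ++ tail).modify m f = List.replicate m a ++ (f a :: tail) := by
  intro m
  induction m with
  | zero => simp [List.replicate, List.modify]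
  | succ n ih =>
      rw [List.replicate_succ (n := n+1), List.cons_append, List.modify_cons]
      rw [if_neg (by simp), Nat.add_sub_cancel, ih, List.replicate_succ, List.cons_append]

lemma pvLoopA_zero (l : List Int) (letters : List Int) : pvLoopA l letters 0 = (letters, 0) := by
  cases l <;> simp [pvLoopA]

-- characterisation of A's greedy loop starting from all-'a' codes
lemma pvLoopA_spec (m : Nat) : ∀ (tail : List Int) (R : Int), 0 ≤ R → R ≤ 25 * m →
    pvLoopA (PySem.List.pyRange ((m : Int) - 1) (-1) (-1)) (List.replicate m (97 : Int) ++ tail) R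
      = (List.replicate (m - (R / 25).toNat - (if R % 25 ≠ 0 then 1 else 0)) (97 : Int)
          ++ (if R % 25 ≠ 0 then [97 + R % 25] else [])
          ++ List.replicate (R / 25).toNat (122 : Int) ++ tail, 0) := by
  induction m with
  | zero =>
      intro tail R h0 h1
      have hR : R = 0 := le_antisymm (by simpa using h1) h0
      subst hR
      rw [PySem.List.pyRange_neg_one_eq_nil (by norm_num)]
      simp [pvLoopA]
  | succ n ih =>
      intro tail R h0 h1
      rw [PySem.List.pyRange_neg_one_cons (show (-1 : Int) < (↑(n + 1) : Int) - 1 by push_cast; omega)]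
      rw [show ((↑(n + 1) : Int) - 1 - 1) = (↑n : Int) - 1 by push_cast; ring]
      rcases eq_or_lt_of_le h0 with h0' | hpos
      · -- R = 0: loop breaks immediately
        rw [← h0']
        simp [pvLoopA]
      · rw [pvLoopA, if_neg (by omega),
            show (((↑(n + 1) : Int) - 1)).toNat = n by omega]
        by_cases h25 : 25 ≤ R
        · -- full bump: last position becomes 'z', recurse on the prefix
          rw [show min R 25 = 25 by omega, modify_replicate_append,
              ih ((97 + 25) :: tail) (R - 25) (by omega) (by push_cast at h1 ⊢; omega)]
          have hq : ((R - 25) / 25) = R / 25 - 1 := by omega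
          have hr : (R - 25) % 25 = R % 25 := by omega
          have hq1 : 1 ≤ R / 25 := by omega
          rw [hr, hq]
          have e1 : n + 1 - (R / 25).toNat - (if R % 25 ≠ 0 then 1 else 0)
              = n - ((R / 25 - 1)).toNat - (if R % 25 ≠ 0 then 1 else 0) := by
            split_ifs <;> omega
          have e2 : (R / 25).toNat = (R / 25 - 1).toNat + 1 := by omega
          rw [e1, e2, List.replicate_succ']
          simp only [List.append_assoc, List.cons_append, List.nil_append]
          norm_num
        · -- partial bump: add all of remaining, the loop then breaks
          rw [show min R 25 = R by omega, modify_replicate_append,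
              show R - R = 0 by ring, pvLoopA_zero]
          rw [show R / 25 = 0 by omega, show R % 25 = R by omega]
          simp [show R ≠ 0 by omega, List.append_assoc]

-- ===== VERDICT (by name: the statement is the Claim_ definition above) =====
theorem find_letter_combination_py_spec : Claim_equal_find_letter_combination_py := by
  unfold Claim_equal_find_letter_combination_py
  intro t wc _
  unfold Spec_find_letter_combination_py find_letter_combination_py find_letter_combination_py_alt
  by_cases hb : wc * 97 ≤ t ∧ t ≤ wc * 122
  · rw [if_neg (by omega), if_pos hb]
    have hwc : 0 ≤ wc := by nlinarith [hb.1, hb.2]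
    have hm : wc = ((wc.toNat : Int)) := by omega
    set m := wc.toNat with hmdef
    have h0 : 0 ≤ t - wc * 97 := by omega
    have h1 : t - wc * 97 ≤ 25 * m := by omega
    have hspec := pvLoopA_spec m [] (t - wc * 97) h0 h1
    simp only [List.append_nil] at hspec
    rw [show PySem.List.pyRange (wc - 1) (-1) (-1) = PySem.List.pyRange ((m : Int) - 1) (-1) (-1) by rw [← hm]]
    rw [hspec]
    simp only [ne_eq, not_true_eq_false, if_false]
    set R := t - wc * 97 with hR
    rw [PySem.Int.floordiv_eq_ediv_of_pos (by norm_num), PySem.Int.mod_eq_emod_of_pos (by norm_num)]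
    have hq0 : 0 ≤ R / 25 := by omega
    have hqm : R / 25 ≤ (m : Int) := by omega
    have hqm' : R % 25 ≠ 0 → R / 25 < (m : Int) := by omega
    congr 1
    simp only [List.map_append, List.map_replicate]
    rw [show String.ofList [Char.ofNat (97 : Int).toNat] = "a" by decide,
        show String.ofList [Char.ofNat (122 : Int).toNat] = "z" by decide]
    by_cases hc : R % 25 = 0
    · have e : (wc - R / 25 - (0 : Int)).toNat = m - (R / 25).toNat := by omega
      simp only [hc, not_true_eq_false, if_false]
      simp only [List.map_nil, List.append_nil]
      rw [e, Nat.sub_zero]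
    · have hqlt : R / 25 < (m : Int) := hqm' hc
      have e : (wc - R / 25 - (1 : Int)).toNat = m - (R / 25).toNat - 1 := by omega
      simp only [hc, not_false_eq_true, if_true, List.map_cons, List.map_nil]
      rw [e]
  · rw [if_pos (by omega), if_neg hb]
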